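-- pv_equiv track=rewrite | github.com/ContextVault/Sales | backend/app/mock_apis.py | _normalize_customer_name
-- ===== SOURCE A (Python) =====
-- from typing import Dict, Optional
--
-- MOCK_CRM_DATA: Dict[str, Dict] = {
--     "MedTech Corp": {
--         "customer_name": "MedTech Corp",
--         "arr": 450000,
--         "tier": "enterprise",
--         "industry": "healthcare",
--         "contract_start": "2024-07-01",
--         "contract_end": "2026-06-30",
--         "account_owner": "john.sales@company.com"
--     },
--     "HealthTech Inc": {
--         "customer_name": "HealthTech Inc",
--         "arr": 320000,
--         "tier": "enterprise",
--         "industry": "healthcare",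
--         "contract_start": "2025-01-15",
--         "contract_end": "2027-01-14",
--         "account_owner": "sarah.sales@company.com"
--     },
--     "BioPharm LLC": {
--         "customer_name": "BioPharm LLC",
--         "arr": 180000,
--         "tier": "growth",
--         "industry": "biotech",
--         "contract_start": "2025-06-01",
--         "contract_end": "2026-05-31",
--         "account_owner": "mike.sales@company.com"
--     },
--     "FinServe Co": {
--         "customer_name": "FinServe Co",
--         "arr": 620000,
--         "tier": "enterprise",
--         "industry": "finance",
--         "contract_start": "2023-03-01",
--         "contract_end": "2026-02-28",
--         "account_owner": "john.sales@company.com"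
--     },
--     "TechStartup XYZ": {
--         "customer_name": "TechStartup XYZ",
--         "arr": 45000,
--         "tier": "startup",
--         "industry": "tech",
--         "contract_start": "2025-11-01",
--         "contract_end": "2026-10-31",
--         "account_owner": "lisa.sales@company.com"
--     }
-- }
--
-- def _normalize_customer_name(name: str) -> Optional[str]:
--     """
--     Normalize customer name for lookup.
--     Handles case-insensitivity and common variations.
--     """
--     name_lower = name.lower().strip()
--
--     for key in MOCK_CRM_DATA.keys():
--         if key.lower() == name_lower:
--             return key
--
--     # Try partial matching
--     for key in MOCK_CRM_DATA.keys():
--         if name_lower in key.lower() or key.lower() in name_lower: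
--             return key
--
--     return None
-- ===== SOURCE B (Python) =====
-- from typing import Dict, Optional
--
-- MOCK_CRM_DATA: Dict[str, Dict] = {
--     "MedTech Corp": {},
--     "HealthTech Inc": {},
--     "BioPharm LLC": {},
--     "FinServe Co": {},
--     "TechStartup XYZ": {},
-- }
--
-- def _normalize_customer_name(name: str) -> Optional[str]:
--     """Single pass: exact match returns immediately; first partial match kept as fallback."""
--     name_lower = name.lower().strip()
--     fallback = None
--     for key in MOCK_CRM_DATA.keys():
--         kl = key.lower()
--         if kl == name_lower:
--             return key
--         if fallback is None and (name_lower in kl or kl in name_lower):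
--             fallback = key
--     return fallback
-- ===== Notes on version B (the rewrite author's own statement) =====
-- stated objective: simpler
-- what changed: Replaces A's two successive scans over the key list (one for exact matches, one for partial matches) with a single pass that returns immediately on an exact match and remembers the first partial match in a fallback variable.
import Mathlib
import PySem

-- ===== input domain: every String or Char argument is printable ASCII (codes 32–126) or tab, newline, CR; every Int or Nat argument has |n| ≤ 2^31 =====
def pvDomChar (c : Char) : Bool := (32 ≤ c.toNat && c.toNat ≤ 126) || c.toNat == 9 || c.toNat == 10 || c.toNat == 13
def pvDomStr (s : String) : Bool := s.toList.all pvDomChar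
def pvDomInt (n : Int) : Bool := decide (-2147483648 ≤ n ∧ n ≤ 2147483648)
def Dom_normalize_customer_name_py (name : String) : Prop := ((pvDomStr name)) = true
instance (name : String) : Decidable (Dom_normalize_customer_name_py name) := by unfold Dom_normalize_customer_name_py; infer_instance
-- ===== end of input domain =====

-- B merges A's two scans over the fixed key list into one pass with a fallback variable (simpler, same O(k) cost).

-- ===== PORT A =====
-- the keys of MOCK_CRM_DATA, in insertion order
def pvKeys : List String := ["MedTech Corp", "HealthTech Inc", "BioPharm LLC", "FinServe Co", "TechStartup XYZ"]

-- first loop of A: exact case-insensitive match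
def pvExactLoop (nl : String) : List String → Option String
  | [] => none
  | k :: ks => if PySem.Str.lower k == nl then some k else pvExactLoop nl ks

-- second loop of A: partial match (substring either way)
def pvPartialLoop (nl : String) : List String → Option String
  | [] => none
  | k :: ks =>
      if PySem.Str.isIn nl (PySem.Str.lower k) || PySem.Str.isIn (PySem.Str.lower k) nl then some k
      else pvPartialLoop nl ks

def normalize_customer_name_py (name : String) : Option String :=
  let name_lower := PySem.Str.strip (PySem.Str.lower name)
  match pvExactLoop name_lower pvKeys with
  | some k => some k
  | none => pvPartialLoop name_lower pvKeys

-- ===== PORT B =====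
-- single pass: return on exact match, remember first partial match in fb
def pvLoopB (nl : String) : List String → Option String → Option String
  | [], fb => fb
  | k :: ks, fb =>
      let kl := PySem.Str.lower k
      if kl == nl then some k
      else pvLoopB nl ks (if fb.isNone && (PySem.Str.isIn nl kl || PySem.Str.isIn kl nl) then some k else fb)

def normalize_customer_name_py_alt (name : String) : Option String :=
  pvLoopB (PySem.Str.strip (PySem.Str.lower name)) pvKeys none

-- ===== PRECONDITION & SPEC =====
def Spec_normalize_customer_name_py (name : String) (out : Option String) : Prop := out = normalize_customer_name_py_alt name
instance (name : String) (out : Option String) : Decidable (Spec_normalize_customer_name_py name out) := by unfold Spec_normalize_customer_name_py; infer_instance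

-- ===== CLAIM (what is proved, stated in full; the proofs are below) =====
def Claim_equal_normalize_customer_name_py : Prop := ∀ (name : String), Dom_normalize_customer_name_py name → Spec_normalize_customer_name_py name (normalize_customer_name_py name)

-- ===== LEMMAS AND PROOFS =====

-- invariant of B's loop: exact match wins; otherwise an already-set fallback, else the first partial match
theorem pvLoopB_eq (nl : String) (ks : List String) (fb : Option String) :
    pvLoopB nl ks fb =
      match pvExactLoop nl ks with
      | some k => some k
      | none => match fb with
                | some f => some f
                | none => pvPartialLoop nl ks := by
  induction ks generalizing fb with
  | nil => cases fb <;> simp [pvLoopB, pvExactLoop, pvPartialLoop]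
  | cons k ks ih =>
    simp only [pvLoopB, pvExactLoop, pvPartialLoop]
    by_cases hx : PySem.Str.lower k == nl
    · simp [hx]
    · simp only [hx, ih]
      cases fb <;> cases hE : pvExactLoop nl ks <;> split_ifs <;> simp_all

-- ===== VERDICT (by name: the statement is the Claim_ definition above) =====
theorem normalize_customer_name_py_spec : Claim_equal_normalize_customer_name_py := by
  intro name _
  unfold Spec_normalize_customer_name_py normalize_customer_name_py normalize_customer_name_py_alt
  rw [pvLoopB_eq]
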